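-- pv_equiv track=rewrite | github.com/Rejn2024/Conserve | advanced_link_skdsp_v5_robust_torch.py | pilot_positions
-- ===== SOURCE A (Python) =====
-- from typing import Dict, List, Optional, Tuple, Union
--
-- PILOT_INTERVAL_BITS = 128
--
-- PILOT_BLOCK_BITS = 16
--
-- def pilot_positions(total_data_len: int, interval: int = PILOT_INTERVAL_BITS, p_len: int = PILOT_BLOCK_BITS) -> List[Tuple[int, int, int, int]]:
--     pos = []; data_consumed = 0; stream_idx = 0
--     while data_consumed < total_data_len:
--         chunk = min(interval, total_data_len - data_consumed); ds = stream_idx; de = stream_idx + chunk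
--         stream_idx += chunk; data_consumed += chunk
--         if data_consumed < total_data_len:
--             ps = stream_idx; pe = stream_idx + p_len; pos.append((ds, de, ps, pe)); stream_idx += p_len
--         else: pos.append((ds, de, -1, -1))
--     return pos
-- ===== SOURCE B (Python) =====
-- PILOT_INTERVAL_BITS = 128
-- PILOT_BLOCK_BITS = 16
--
-- def pilot_positions(total_data_len: int, interval: int = PILOT_INTERVAL_BITS, p_len: int = PILOT_BLOCK_BITS):
--     if total_data_len <= 0:
--         return []
--     n = -(-total_data_len // interval)          # number of chunks (ceil division)
--     last = total_data_len - (n - 1) * interval  # length of the final chunk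
--     return [
--         (i * (interval + p_len),
--          i * (interval + p_len) + interval,
--          i * (interval + p_len) + interval,
--          i * (interval + p_len) + interval + p_len)
--         if i < n - 1 else
--         (i * (interval + p_len), i * (interval + p_len) + last, -1, -1)
--         for i in range(n)
--     ]
-- ===== Notes on version B (the rewrite author's own statement) =====
-- stated objective: alternative
-- what changed: Replaced the while-loop threading data_consumed/stream_idx accumulators by a closed-form comprehension: the chunk count n is computed by ceiling division and each tuple is derived arithmetically from its index i.
-- outside the precondition, e.g. on pilot_positions(5, 0, 16): A does not finish within the time limit, B raises ZeroDivisionError; on pilot_positions(5, -2, 16): A does not finish within the time limit, B returns []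
import Mathlib
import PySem

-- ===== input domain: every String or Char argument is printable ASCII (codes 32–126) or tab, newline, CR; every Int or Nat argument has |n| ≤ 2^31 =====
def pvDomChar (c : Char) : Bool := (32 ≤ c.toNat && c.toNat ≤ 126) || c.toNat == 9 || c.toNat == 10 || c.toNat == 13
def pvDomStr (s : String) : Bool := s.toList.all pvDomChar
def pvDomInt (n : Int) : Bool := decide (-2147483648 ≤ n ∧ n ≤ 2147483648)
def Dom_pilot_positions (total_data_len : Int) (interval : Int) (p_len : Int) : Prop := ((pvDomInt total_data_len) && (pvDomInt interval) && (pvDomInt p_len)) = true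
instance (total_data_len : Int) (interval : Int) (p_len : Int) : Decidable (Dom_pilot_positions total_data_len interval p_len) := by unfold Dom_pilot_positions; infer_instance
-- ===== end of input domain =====

-- B replaces A's accumulator-threading while loop by closed-form index arithmetic
-- over a ceiling-division chunk count (objective: alternative decomposition).

-- ===== PORT A =====
-- literal port of A's while loop; fuel = total_data_len.toNat bounds the iterations
-- (each iteration consumes ≥ 1 whenever interval > 0, i.e. on all of Pre_).
def pilotLoopA (total interval p_len : Int) : Nat → List (Int × Int × Int × Int) → Int → Int → List (Int × Int × Int × Int)
  | 0, pos, _, _ => pos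
  | fuel + 1, pos, data_consumed, stream_idx =>
    if data_consumed < total then
      let chunk := min interval (total - data_consumed)
      let ds := stream_idx
      let de := stream_idx + chunk
      let stream_idx' := stream_idx + chunk
      let data_consumed' := data_consumed + chunk
      if data_consumed' < total then
        pilotLoopA total interval p_len fuel
          (pos ++ [(ds, de, stream_idx', stream_idx' + p_len)]) data_consumed' (stream_idx' + p_len)
      else pos ++ [(ds, de, -1, -1)]
    else pos

def pilot_positions (total_data_len : Int) (interval : Int) (p_len : Int) : List (Int × Int × Int × Int) :=
  pilotLoopA total_data_len interval p_len total_data_len.toNat [] 0 0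

-- ===== PORT B =====
def pilot_positions_alt (total_data_len : Int) (interval : Int) (p_len : Int) : List (Int × Int × Int × Int) :=
  if total_data_len ≤ 0 then []
  else
    let n := -(PySem.Int.floordiv (-total_data_len) interval)
    let last := total_data_len - (n - 1) * interval
    (PySem.List.pyRange 0 n 1).map (fun i =>
      if i < n - 1 then
        (i * (interval + p_len), i * (interval + p_len) + interval,
         i * (interval + p_len) + interval, i * (interval + p_len) + interval + p_len)
      else (i * (interval + p_len), i * (interval + p_len) + last, -1, -1))

-- ===== PRECONDITION & SPEC =====
-- Pre_ excludes total_data_len > 0 with interval ≤ 0: there A's loop never consumes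
-- data and DIVERGES (no return value), so nothing is claimed about those inputs.
def Pre_pilot_positions (total_data_len : Int) (interval : Int) (p_len : Int) : Prop :=
  total_data_len ≤ 0 ∨ 0 < interval
instance (total_data_len : Int) (interval : Int) (p_len : Int) : Decidable (Pre_pilot_positions total_data_len interval p_len) := by unfold Pre_pilot_positions; infer_instance

def pvWitness_pilot_positions : Int × Int × Int := (300, 128, 16)

def Spec_pilot_positions (total_data_len : Int) (interval : Int) (p_len : Int) (out : List (Int × Int × Int × Int)) : Prop := out = pilot_positions_alt total_data_len interval p_len
instance (total_data_len : Int) (interval : Int) (p_len : Int) (out : List (Int × Int × Int × Int)) : Decidable (Spec_pilot_positions total_data_len interval p_len out) := by unfold Spec_pilot_positions; infer_instance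

-- ===== CLAIM (what is proved, stated in full; the proofs are below) =====
def Claim_equal_pilot_positions : Prop := ∀ (total_data_len : Int) (interval : Int) (p_len : Int), Dom_pilot_positions total_data_len interval p_len → Pre_pilot_positions total_data_len interval p_len → Spec_pilot_positions total_data_len interval p_len (pilot_positions total_data_len interval p_len)

-- ===== LEMMAS AND PROOFS =====

-- the per-index tuple of B
def pvTupB (interval p_len n last : Int) (i : Int) : Int × Int × Int × Int :=
  if i < n - 1 then
    (i * (interval + p_len), i * (interval + p_len) + interval,
     i * (interval + p_len) + interval, i * (interval + p_len) + interval + p_len)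
  else (i * (interval + p_len), i * (interval + p_len) + last, -1, -1)

-- bracketing of the ceiling quotient n: (n-1)*interval < total ≤ n*interval
theorem pv_ceil_bounds (total interval : Int) (hi : 0 < interval) (ht : 0 < total) :
    (-(PySem.Int.floordiv (-total) interval) - 1) * interval < total ∧
    total ≤ -(PySem.Int.floordiv (-total) interval) * interval := by
  have hne : interval ≠ 0 := by omega
  have h := Int.ediv_add_emod (-total) interval
  have hr0 : 0 ≤ (-total) % interval := Int.emod_nonneg _ hne
  have hr1 : (-total) % interval < interval := Int.emod_lt_of_pos _ hi
  rw [PySem.Int.floordiv_eq_ediv_of_pos hi]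
  constructor <;> nlinarith

-- main loop invariant: after k full chunks, A's remaining loop produces B's tail from index k
theorem pv_loop_inv (total interval p_len : Int) (hi : 0 < interval)
    (n : Int) (hn1 : (n - 1) * interval < total) (hn2 : total ≤ n * interval) :
    ∀ (fuel : Nat) (k : Int) (pos : List (Int × Int × Int × Int)),
      0 ≤ k → k * interval < total → (total - k * interval).toNat ≤ fuel →
      pilotLoopA total interval p_len fuel pos (k * interval) (k * (interval + p_len)) =
        pos ++ (PySem.List.pyRange k n 1).map (pvTupB interval p_len n (total - (n - 1) * interval)) := by
  intro fuel
  induction fuel with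
  | zero => intro k pos hk hlt hf; omega
  | succ m ih =>
    intro k pos hk hlt hf
    have hkn : k < n := by
      by_contra h
      push_neg at h
      have : n * interval ≤ k * interval := by
        exact mul_le_mul_of_nonneg_right h (le_of_lt hi)
      omega
    rw [PySem.List.pyRange_one_cons hkn]
    simp only [pilotLoopA, if_pos hlt]
    by_cases hmore : k * interval + min interval (total - k * interval) < total
    · -- non-final chunk: chunk = interval
      have hchunk : min interval (total - k * interval) = interval := by omega
      rw [if_pos (by rw [hchunk] at hmore ⊢; exact hmore)]
      have hk1 : k < n - 1 := by
        by_contra h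
        push_neg at h
        have h2 : n * interval ≤ (k + 1) * interval :=
          mul_le_mul_of_nonneg_right (by omega) (le_of_lt hi)
        rw [hchunk] at hmore
        have h3 : (k + 1) * interval = k * interval + interval := by ring
        omega
      rw [hchunk]
      have e1 : k * interval + interval = (k + 1) * interval := by ring
      have e2 : k * (interval + p_len) + interval + p_len = (k + 1) * (interval + p_len) := by ring
      have hmore' : (k + 1) * interval < total := by rw [hchunk] at hmore; omega
      rw [e1, e2, ih (k + 1) _ (by omega) hmore' (by omega)]
      have heq : ((k * (interval + p_len), k * (interval + p_len) + interval,
          k * (interval + p_len) + interval, (k + 1) * (interval + p_len)) : Int × Int × Int × Int)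
          = pvTupB interval p_len n (total - (n - 1) * interval) k := by
        unfold pvTupB
        rw [if_pos hk1, show (k + 1) * (interval + p_len)
            = k * (interval + p_len) + interval + p_len from by ring]
      rw [heq]
      simp
    · -- final chunk
      rw [if_neg (by omega)]
      have hchunk : min interval (total - k * interval) = total - k * interval := by omega
      have hkeq : k = n - 1 := by
        have h1 : total ≤ k * interval + interval := by omega
        by_contra h
        have h3 : k * interval + interval = (k + 1) * interval := by ring
        have h2 : (k + 1) * interval ≤ (n - 1) * interval :=
          mul_le_mul_of_nonneg_right (by omega) (le_of_lt hi)
        omega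
      have hnil : PySem.List.pyRange (k + 1) n 1 = [] :=
        PySem.List.pyRange_one_eq_nil (by omega)
      rw [hnil]
      simp only [List.map_cons, List.map_nil]
      unfold pvTupB
      rw [if_neg (show ¬ k < n - 1 by omega), hchunk, hkeq]

-- ===== VERDICT (by name: the statement is the Claim_ definition above) =====
theorem pilot_positions_spec : Claim_equal_pilot_positions := by
  intro total interval p_len _hdom hpre
  unfold Spec_pilot_positions pilot_positions pilot_positions_alt
  by_cases ht : total ≤ 0
  · rw [if_pos ht]
    have : total.toNat = 0 := by omega
    rw [this]
    rfl
  · push_neg at ht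
    have hi : 0 < interval := by
      rcases hpre with h | h
      · omega
      · exact h
    rw [if_neg (by omega)]
    have hb := pv_ceil_bounds total interval hi ht
    have := pv_loop_inv total interval p_len hi
      (-(PySem.Int.floordiv (-total) interval)) hb.1 hb.2
      total.toNat 0 [] le_rfl (by omega) (by omega)
    simp only [zero_mul] at this
    rw [this]
    simp only [List.nil_append]
    rfl
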